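-- pv_equiv track=rewrite | github.com/Jacoroch/Estructura-de-datos-y-algoritmos-1 | ContarX.py | contarX
-- ===== SOURCE A (Python) =====
-- def contarX(str):
--     print (str)
--
--     if len(str) == 0:
--         return 0
--     elif str[0] == "x":
--         return 1 + contarX(str[1:])
--     else    :
--         return contarX(str[1:])
-- ===== SOURCE B (Python) =====
-- def contarX(str):
--     count = 0
--     for i, ch in enumerate(str):
--         print(str[i:])
--         if ch == "x":
--             count += 1
--     print("")
--     return count
-- ===== Notes on version B (the rewrite author's own statement) =====
-- stated objective: idiomatic
-- what changed: Replaced the suffix recursion by a single iterative enumerate loop with a count accumulator (same prints: every suffix then the empty string), no recursion.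
import Mathlib
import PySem

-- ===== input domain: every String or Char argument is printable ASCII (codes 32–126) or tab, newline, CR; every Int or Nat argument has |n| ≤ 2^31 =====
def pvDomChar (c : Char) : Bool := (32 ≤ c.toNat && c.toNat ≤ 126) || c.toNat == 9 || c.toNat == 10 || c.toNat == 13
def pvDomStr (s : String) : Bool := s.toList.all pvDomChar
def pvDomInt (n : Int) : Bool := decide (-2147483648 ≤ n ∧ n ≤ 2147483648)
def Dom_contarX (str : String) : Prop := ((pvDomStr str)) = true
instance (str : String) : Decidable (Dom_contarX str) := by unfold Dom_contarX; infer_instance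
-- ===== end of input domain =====

-- B replaces A's suffix recursion by one iterative enumerate loop with a count accumulator
-- (idiomatic; prints preserved). Equivalence proved is about the RETURN value only; the
-- console output (each suffix then the empty line) is identical by construction but not modelled.

-- ===== PORT A =====
-- A's recursion on the string: print (ignored), base case empty, else recurse on str[1:].
def contarXGo : List Char → Int
  | [] => 0
  | c :: t => if c = 'x' then 1 + contarXGo t else contarXGo t

def contarX (str : String) : Int := contarXGo str.toList

-- ===== PORT B =====
-- B's loop: for (i, ch) in enumerate(str): count += 1 if ch == 'x' (prints ignored).
def contarX_alt (str : String) : Int :=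
  (PySem.List.enumerate str.toList 0).foldl
    (fun count p => if p.2 = 'x' then count + 1 else count) 0

-- ===== PRECONDITION & SPEC =====
def Spec_contarX (str : String) (out : Int) : Prop := out = contarX_alt str
instance (str : String) (out : Int) : Decidable (Spec_contarX str out) := by unfold Spec_contarX; infer_instance

-- ===== CLAIM (what is proved, stated in full; the proofs are below) =====
def Claim_equal_contarX : Prop := ∀ (str : String), Dom_contarX str → Spec_contarX str (contarX str)

-- ===== LEMMAS AND PROOFS =====

theorem contarX_foldl_enum (l : List Char) :
    ∀ (s : Int) (acc : Int),
      (PySem.List.enumerate l s).foldl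
        (fun count p => if p.2 = 'x' then count + 1 else count) acc
      = acc + contarXGo l := by
  induction l with
  | nil => intro s acc; simp [PySem.List.enumerate_nil, contarXGo]
  | cons c t ih =>
      intro s acc
      rw [PySem.List.enumerate_cons]
      simp only [List.foldl_cons, contarXGo]
      by_cases h : c = 'x' <;> simp [h, ih] <;> ring

-- ===== VERDICT (by name: the statement is the Claim_ definition above) =====
theorem contarX_spec : Claim_equal_contarX := by
  intro str _
  show contarX str = contarX_alt str
  unfold contarX contarX_alt
  rw [contarX_foldl_enum]
  ring
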